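-- pv_equiv track=rewrite | github.com/Nitro27xd/Proyecto-II-Taller-De-Programacion-GR-21 | Grupo_6.py | rotatepieces
-- ===== SOURCE A (Python) =====
-- def voltear_mat(m):
--     rotada=[]
--     for i in range(len(m[0])):
--         rotada.append([])
--         for j in range(len(m)):
--             rotada[i].append(m[len(m)-1-j][i])
--     return rotada
--
-- def pieza_espejo(pieza):
--     piezaespejo=[]
--     for fila in pieza:
--         piezaespejo.append(fila[::-1])
--     return piezaespejo
--
-- def newpieces(l1,l2):
--     piecitas=[]
--     for i in range(4):
--         piecitas.append(l1[i])
--         piecitas.append(l2[i])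
--     return piecitas
--
-- def rotatepieces(P,pieces):
--     rotatedpieces=[]
--     flippieces=[]
--     allrotatedpieces=[]
--     for i in range (P):
--         rotatedpieces.append(pieces[i])
--         flippieces.append(pieza_espejo(pieces[i]))
--         for j in range(3):
--             rotatedpieces.append(voltear_mat(rotatedpieces[j]))
--             flippieces.append(pieza_espejo(rotatedpieces[j+1]))
--         allrotatedpieces.append(newpieces(rotatedpieces,flippieces))
--         rotatedpieces=[]
--         flippieces=[]
--     return allrotatedpieces
-- ===== SOURCE B (Python) =====
-- def rotatepieces(P, pieces):
--     out = []
--     for i in range(P):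
--         m = pieces[i]
--         R, C = len(m), len(m[0])
--         r1 = [[m[R - 1 - j][a] for j in range(R)] for a in range(C)]
--         r2 = [[m[R - 1 - a][C - 1 - j] for j in range(C)] for a in range(R)]
--         r3 = [[m[j][C - 1 - a] for j in range(R)] for a in range(C)]
--         mir = lambda r: [row[::-1] for row in r]
--         out.append([m, mir(m), r1, mir(r1), r2, mir(r2), r3, mir(r3)])
--     return out
-- ===== Notes on version B (the rewrite author's own statement) =====
-- stated objective: alternative
-- what changed: B replaces A's iterative rotate-then-mirror chain (repeated voltear_mat calls feeding two parallel lists merged by newpieces) with closed-form coordinate formulas: each of the three rotations is built directly from the original matrix by direct index mapping (rot1[a][j]=m[R-1-j][a], rot2[a][j]=m[R-1-a][C-1-j], rot3[a][j]=m[j][C-1-a]), and the 8 variants are emitted in order in one literal list.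
import Mathlib
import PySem

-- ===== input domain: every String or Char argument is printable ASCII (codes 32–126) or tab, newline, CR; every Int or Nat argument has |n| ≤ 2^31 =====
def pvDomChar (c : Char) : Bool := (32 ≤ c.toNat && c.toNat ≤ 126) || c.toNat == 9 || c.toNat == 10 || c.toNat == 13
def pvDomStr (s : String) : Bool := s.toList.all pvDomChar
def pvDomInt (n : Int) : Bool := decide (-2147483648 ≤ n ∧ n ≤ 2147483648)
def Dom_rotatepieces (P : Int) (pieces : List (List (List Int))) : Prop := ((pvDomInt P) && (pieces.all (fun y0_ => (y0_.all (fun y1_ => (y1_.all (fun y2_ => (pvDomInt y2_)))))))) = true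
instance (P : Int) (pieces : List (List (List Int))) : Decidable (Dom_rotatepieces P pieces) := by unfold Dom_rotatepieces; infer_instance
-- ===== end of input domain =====

-- B computes each of the 3 rotations directly from the original matrix by closed-form
-- coordinate formulas and emits the 8 variants as one literal list, replacing A's iterative
-- voltear_mat chain, two parallel lists and newpieces interleaving pass; objective: alternative.


-- ===== PORT A =====
-- voltear_mat: build output row i by scanning j over the rows, reading m[len(m)-1-j][i]
def voltear_mat (m : List (List Int)) : List (List Int) :=
  (List.range (m.headD []).length).foldl (fun rotada (i : Nat) =>
    rotada ++ [(List.range m.length).foldl (fun fila (j : Nat) =>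
      fila ++ [PySem.List.pyGetD (PySem.List.pyGetD m ((m.length : Int) - 1 - (j : Int)) []) (i : Int) 0]) []]) []

-- pieza_espejo: fila[::-1] is exactly List.reverse (PySem.List.slice?_none_none_neg_one)
def pieza_espejo (pieza : List (List Int)) : List (List Int) :=
  pieza.foldl (fun acc fila => acc ++ [fila.reverse]) []

def newpieces (l1 l2 : List (List (List Int))) : List (List (List Int)) :=
  (List.range 4).foldl (fun piecitas (i : Nat) =>
    piecitas ++ [PySem.List.pyGetD l1 (i : Int) []] ++ [PySem.List.pyGetD l2 (i : Int) []]) []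

def rotatepieces (P : Int) (pieces : List (List (List Int))) : List (List (List (List Int))) :=
  (PySem.List.pyRange 0 P 1).foldl (fun allrotatedpieces i =>
    let rp0 := [PySem.List.pyGetD pieces i []]
    let fp0 := [pieza_espejo (PySem.List.pyGetD pieces i [])]
    let st := (List.range 3).foldl
      (fun (st : List (List (List Int)) × List (List (List Int))) (j : Nat) =>
        let rp := st.1 ++ [voltear_mat (PySem.List.pyGetD st.1 (j : Int) [])]
        (rp, st.2 ++ [pieza_espejo (PySem.List.pyGetD rp ((j : Int) + 1) [])]))
      (rp0, fp0)
    allrotatedpieces ++ [newpieces st.1 st.2]) []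

-- ===== PORT B =====
-- Source B's r1/r2/r3 comprehensions: closed-form index formulas m[R-1-j][a], m[R-1-a][C-1-j],
-- m[j][C-1-a]. Indexing is via getD, exact on Pre_ where every read Source B performs is in range.
def pvRot1 (m : List (List Int)) : List (List Int) :=
  (List.range (m.headD []).length).map (fun a =>
    (List.range m.length).map (fun j => (m.getD (m.length - 1 - j) []).getD a 0))

def pvRot2 (m : List (List Int)) : List (List Int) :=
  (List.range m.length).map (fun a =>
    (List.range (m.headD []).length).map (fun j =>
      (m.getD (m.length - 1 - a) []).getD ((m.headD []).length - 1 - j) 0))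

def pvRot3 (m : List (List Int)) : List (List Int) :=
  (List.range (m.headD []).length).map (fun a =>
    (List.range m.length).map (fun j => (m.getD j []).getD ((m.headD []).length - 1 - a) 0))

-- Source B's mir lambda: row[::-1] for each row
def pvMir (r : List (List Int)) : List (List Int) := r.map (fun row => row.reverse)

def rotatepieces_alt (P : Int) (pieces : List (List (List Int))) : List (List (List (List Int))) :=
  (PySem.List.pyRange 0 P 1).foldl (fun out i =>
    let m := PySem.List.pyGetD pieces i []
    out ++ [[m, pvMir m, pvRot1 m, pvMir (pvRot1 m), pvRot2 m, pvMir (pvRot2 m),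
             pvRot3 m, pvMir (pvRot3 m)]]) []

-- ===== PRECONDITION & SPEC =====
-- Pre_ excludes exactly the inputs on which A raises IndexError: P beyond len(pieces), or a used
-- piece that is empty, has an empty first row, or has a row shorter than its first row (the
-- out-of-range reads happen in voltear_mat, on the piece or on one of its iterated rotations).
def Pre_rotatepieces (P : Int) (pieces : List (List (List Int))) : Prop :=
  P ≤ (pieces.length : Int) ∧
  ∀ m ∈ pieces.take P.toNat,
    m ≠ [] ∧ 0 < (m.headD []).length ∧ ∀ r ∈ m, (m.headD []).length ≤ r.length
instance (P : Int) (pieces : List (List (List Int))) : Decidable (Pre_rotatepieces P pieces) := by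
  unfold Pre_rotatepieces; infer_instance

def pvWitness_rotatepieces : Int × List (List (List Int)) := (1, [[[1, 2], [3, 4]]])

def Spec_rotatepieces (P : Int) (pieces : List (List (List Int))) (out : List (List (List (List Int)))) : Prop := out = rotatepieces_alt P pieces
instance (P : Int) (pieces : List (List (List Int))) (out : List (List (List (List Int)))) : Decidable (Spec_rotatepieces P pieces out) := by unfold Spec_rotatepieces; infer_instance

-- ===== CLAIM (what is proved, stated in full; the proofs are below) =====
def Claim_equal_rotatepieces : Prop := ∀ (P : Int) (pieces : List (List (List Int))), Dom_rotatepieces P pieces → Pre_rotatepieces P pieces → Spec_rotatepieces P pieces (rotatepieces P pieces)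

-- ===== LEMMAS AND PROOFS =====

lemma voltear_shape (m : List (List Int)) :
    voltear_mat m = (List.range (m.headD []).length).map (fun (i : Nat) =>
      (List.range m.length).map (fun (j : Nat) =>
        PySem.List.pyGetD (PySem.List.pyGetD m ((m.length : Int) - 1 - (j : Int)) []) (i : Int) 0)) := by
  simp only [voltear_mat, PySem.List.foldl_append_singleton_eq_map, List.nil_append]

lemma espejo_eq (m : List (List Int)) : pieza_espejo m = pvMir m := by
  simp only [pieza_espejo, pvMir, PySem.List.foldl_append_singleton_eq_map, List.nil_append]

lemma closed1 (m : List (List Int)) : voltear_mat m = pvRot1 m := by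
  rw [voltear_shape, pvRot1]
  apply List.map_congr_left; intro a _
  apply List.map_congr_left; intro j hj
  have hj' : j < m.length := List.mem_range.mp hj
  have h : (m.length : Int) - 1 - (j : Int) = ((m.length - 1 - j : Nat) : Int) := by omega
  rw [h, PySem.List.pyGetD_natCast, PySem.List.pyGetD_natCast]

lemma getD_map_range' {α : Type} (f : Nat → α) (n k : Nat) (d : α) (h : k < n) :
    ((List.range n).map f).getD k d = f k := by
  rw [List.getD_eq_getElem?_getD, List.getElem?_map, List.getElem?_range h]; rfl

lemma closed2 (m : List (List Int)) (hC : 0 < (m.headD []).length) :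
    voltear_mat (pvRot1 m) = pvRot2 m := by
  have hhead : (pvRot1 m).headD [] =
      (List.range m.length).map (fun j => (m.getD (m.length - 1 - j) []).getD 0 0) := by
    rw [pvRot1]
    obtain ⟨k, hk⟩ : ∃ k, (m.headD []).length = k + 1 := ⟨_, (Nat.succ_pred_eq_of_pos hC).symm⟩
    rw [hk, List.range_succ_eq_map, List.map_cons, List.headD_cons]
  rw [voltear_shape, pvRot2, hhead]
  simp only [List.length_map, List.length_range, pvRot1]
  apply List.map_congr_left; intro a ha
  have ha' : a < m.length := List.mem_range.mp ha
  apply List.map_congr_left; intro j hj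
  have hj' : j < (m.headD []).length := List.mem_range.mp hj
  have h1 : ((m.headD []).length : Int) - 1 - (j : Int)
      = (((m.headD []).length - 1 - j : Nat) : Int) := by omega
  rw [h1, PySem.List.pyGetD_natCast, PySem.List.pyGetD_natCast,
    getD_map_range' _ _ _ _ (by omega), getD_map_range' _ _ _ _ ha']

lemma closed3 (m : List (List Int)) (hR : m ≠ []) :
    voltear_mat (pvRot2 m) = pvRot3 m := by
  have hlen : 0 < m.length := List.length_pos_iff.mpr hR
  have hhead : (pvRot2 m).headD [] =
      (List.range (m.headD []).length).map (fun j =>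
        (m.getD (m.length - 1) []).getD ((m.headD []).length - 1 - j) 0) := by
    rw [pvRot2]
    obtain ⟨k, hk⟩ : ∃ k, m.length = k + 1 := ⟨_, (Nat.succ_pred_eq_of_pos hlen).symm⟩
    rw [hk, List.range_succ_eq_map, List.map_cons, List.headD_cons]
    simp
  rw [voltear_shape, pvRot3, hhead]
  simp only [List.length_map, List.length_range, pvRot2]
  apply List.map_congr_left; intro a ha
  have ha' : a < (m.headD []).length := List.mem_range.mp ha
  apply List.map_congr_left; intro j hj
  have hj' : j < m.length := List.mem_range.mp hj
  have h1 : ((m.length : Nat) : Int) - 1 - (j : Int) = ((m.length - 1 - j : Nat) : Int) := by omega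
  rw [h1, PySem.List.pyGetD_natCast, PySem.List.pyGetD_natCast,
    getD_map_range' _ _ _ _ (by omega), getD_map_range' _ _ _ _ ha']
  congr 2
  omega

-- the per-piece body of A's outer loop equals B's literal 8-element list on a good piece
lemma piece_eq (m : List (List Int)) (hR : m ≠ []) (hC : 0 < (m.headD []).length) :
    (fun st : List (List (List Int)) × List (List (List Int)) =>
      newpieces st.1 st.2)
    ((List.range 3).foldl
      (fun (st : List (List (List Int)) × List (List (List Int))) (j : Nat) =>
        let rp := st.1 ++ [voltear_mat (PySem.List.pyGetD st.1 (j : Int) [])]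
        (rp, st.2 ++ [pieza_espejo (PySem.List.pyGetD rp ((j : Int) + 1) [])]))
      ([m], [pieza_espejo m]))
    = [m, pvMir m, pvRot1 m, pvMir (pvRot1 m), pvRot2 m, pvMir (pvRot2 m),
       pvRot3 m, pvMir (pvRot3 m)] := by
  have e1 : voltear_mat m = pvRot1 m := closed1 m
  have e2 : voltear_mat (pvRot1 m) = pvRot2 m := closed2 m hC
  have e3 : voltear_mat (pvRot2 m) = pvRot3 m := closed3 m hR
  simp only [List.range_succ, List.range_zero, List.nil_append, List.foldl_append,
    List.foldl_cons, List.foldl_nil, newpieces]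
  simp [PySem.List.pyGetD, e1, e2, e3, espejo_eq]

-- ===== VERDICT (by name: the statement is the Claim_ definition above) =====
theorem rotatepieces_spec : Claim_equal_rotatepieces := by
  intro P pieces _ hPre
  unfold Spec_rotatepieces rotatepieces rotatepieces_alt
  apply PySem.List.foldl_congr_mem
  intro acc x hx
  rw [PySem.List.mem_pyRange_one] at hx
  have hxlen : x.toNat < pieces.length := by have := hPre.1; omega
  have hxP : x.toNat < P.toNat := by omega
  have hmem : PySem.List.pyGetD pieces x [] ∈ pieces.take P.toNat := by
    rw [PySem.List.pyGetD_eq_getElem pieces [] hx.1 (by omega)]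
    have h' : x.toNat < (pieces.take P.toNat).length := by simp; omega
    exact (List.getElem_take (xs := pieces)) ▸ List.getElem_mem h'
  obtain ⟨hne, hpos, -⟩ := hPre.2 _ hmem
  have hp := piece_eq (PySem.List.pyGetD pieces x []) hne hpos
  simp only [] at hp ⊢
  rw [hp]
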